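-- pv_equiv track=rewrite | github.com/zadumka/learning-python | task_ipr.py | even_list
-- ===== SOURCE A (Python) =====
-- def even_list(myList):
--     numberList = []
--     for item in myList:
--         item = item.replace(',','').replace('.','')
--         if item.isdigit():
--             num = int(item)
--             if num > 1:
--                 for i in range(2, num):
--                     if num % i == 0:
--                         break
--                 else:
--                     numberList.append(num)
--     return numberList
-- ===== SOURCE B (Python) =====
-- def _to_num(item):
--     s = item.replace(',', '').replace('.', '')
--     return int(s) if s.isdigit() else None
--
--
-- def _is_prime(n):
--     if n < 2:
--         return False
--     i = 2
--     while i * i <= n: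
--         if n % i == 0:
--             return False
--         i += 1
--     return True
--
--
-- def even_list(myList):
--     return [n for n in map(_to_num, myList) if n is not None and _is_prime(n)]
-- ===== Notes on version B (the rewrite author's own statement) =====
-- stated objective: alternative
-- what changed: B replaces A's full trial division over range(2, num) with trial division only up to sqrt(num), and restructures the pass as a map/filter comprehension with helper functions instead of nested loops with for-else.
import Mathlib
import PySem

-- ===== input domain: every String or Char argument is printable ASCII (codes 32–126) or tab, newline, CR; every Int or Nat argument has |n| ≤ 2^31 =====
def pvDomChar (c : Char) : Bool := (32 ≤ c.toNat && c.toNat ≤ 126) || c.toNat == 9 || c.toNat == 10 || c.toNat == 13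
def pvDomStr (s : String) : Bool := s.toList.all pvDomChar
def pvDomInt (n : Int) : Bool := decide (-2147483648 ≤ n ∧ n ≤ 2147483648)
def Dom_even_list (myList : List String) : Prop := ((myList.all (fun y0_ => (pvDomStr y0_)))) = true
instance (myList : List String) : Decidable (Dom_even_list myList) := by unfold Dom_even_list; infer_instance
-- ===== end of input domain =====

-- ===== PORT A =====
-- B changes A's primality test from full trial division over range(2, num) to trial
-- division up to sqrt(num), and restructures the pass as a map/filter comprehension with
-- helpers instead of nested loops with for-else (objective: alternative).

-- A's inner 'for i in range(2, num): … break / else: append' (true = the else branch runs)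
def pvForElse (num : Int) : List Int → Bool
  | [] => true
  | i :: rest => if PySem.Int.mod num i == 0 then false else pvForElse num rest

def even_list (myList : List String) : List Int :=
  myList.foldl (fun numberList item =>
    let item1 := PySem.Str.replace (PySem.Str.replace item "," "") "." ""
    if PySem.Str.strIsdigit item1 then
      match PySem.Int.ofStr? item1 with
      | some num =>
        if num > 1 then
          if pvForElse num (PySem.List.pyRange 2 num 1) then numberList ++ [num]
          else numberList
        else numberList
      | none => numberList  -- unreachable: int() succeeds on a string that .isdigit()
    else numberList) []

-- ===== PORT B =====
def pvToNum? (item : String) : Option Int :=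
  let s := PySem.Str.replace (PySem.Str.replace item "," "") "." ""
  if PySem.Str.strIsdigit s then PySem.Int.ofStr? s else none

-- B's 'while i * i <= n' loop; i is a Nat counter starting at 2 (it only takes the
-- values 2, 3, 4, … that Python's i takes, so Nat is exact here)
def pvTrial (n : Int) (i : Nat) : Bool :=
  if _h : (i : Int) * (i : Int) ≤ n then
    if PySem.Int.mod n (i : Int) == 0 then false else pvTrial n (i + 1)
  else true
termination_by (n + 1 - (i : Int) * (i : Int)).toNat
decreasing_by
  have h1 : (0:Int) ≤ (i : Int) := Int.natCast_nonneg i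
  rw [Int.toNat_lt_toNat (by omega)]
  push_cast
  nlinarith

def pvIsPrime (n : Int) : Bool :=
  if n < 2 then false else pvTrial n 2

def even_list_alt (myList : List String) : List Int :=
  (myList.map pvToNum?).filterMap (fun o =>
    match o with
    | some n => if pvIsPrime n then some n else none
    | none => none)

-- ===== PRECONDITION & SPEC =====
def Spec_even_list (myList : List String) (out : List Int) : Prop := out = even_list_alt myList
instance (myList : List String) (out : List Int) : Decidable (Spec_even_list myList out) := by unfold Spec_even_list; infer_instance

-- ===== CLAIM (what is proved, stated in full; the proofs are below) =====
def Claim_equal_even_list : Prop := ∀ (myList : List String), Dom_even_list myList → Spec_even_list myList (even_list myList)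

-- ===== LEMMAS AND PROOFS =====

-- A's for-else is an all-scan over the range
theorem pvForElse_eq_all (num : Int) (l : List Int) :
    pvForElse num l = l.all (fun i => !(PySem.Int.mod num i == 0)) := by
  induction l with
  | nil => rfl
  | cons i rest ih =>
    simp only [pvForElse, List.all_cons, ih]
    cases h : (PySem.Int.mod num i == 0) <;> simp [h]

theorem pvForElse_iff (num : Int) :
    pvForElse num (PySem.List.pyRange 2 num 1) = true ↔
      ∀ i : Int, 2 ≤ i → i < num → ¬ (i ∣ num) := by
  rw [pvForElse_eq_all]
  simp [List.all_eq_true, PySem.List.mem_pyRange_one, PySem.Int.mod_eq_zero_iff_dvd]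

-- B's while loop decides "no divisor ≥ i whose square is ≤ n"
theorem pvTrial_iff (n : Int) (i : Nat) :
    pvTrial n i = true ↔
      ∀ m : Nat, i ≤ m → (m : Int) * (m : Int) ≤ n → ¬ ((m : Int) ∣ n) := by
  fun_induction pvTrial n i with
  | case1 i h hdvd =>
    simp only [beq_iff_eq, PySem.Int.mod_eq_zero_iff_dvd] at hdvd
    simp only [Bool.false_eq_true, false_iff]
    push_neg
    exact ⟨i, le_refl i, h, hdvd⟩
  | case2 i h hdvd ih =>
    rw [ih]
    simp only [beq_iff_eq, PySem.Int.mod_eq_zero_iff_dvd] at hdvd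
    constructor
    · intro hall m him hsq
      rcases Nat.eq_or_lt_of_le him with rfl | hlt
      · exact hdvd
      · exact hall m hlt hsq
    · intro hall m him hsq
      exact hall m (Nat.le_of_succ_le him) hsq
  | case3 i h =>
    simp only [true_iff]
    intro m him hsq hd
    apply h
    calc (i : Int) * (i : Int) ≤ (m : Int) * (m : Int) := by
          have hle : (i : Int) ≤ (m : Int) := by exact_mod_cast him
          have h0 : (0:Int) ≤ (i : Int) := Int.natCast_nonneg i
          nlinarith
      _ ≤ n := hsq

-- the sqrt-bounded divisor-free condition equals the full-range one (for num ≥ 2)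
theorem divisor_conditions (num : Int) (h2 : 2 ≤ num) :
    (∀ m : Nat, 2 ≤ m → (m : Int) * (m : Int) ≤ num → ¬ ((m : Int) ∣ num)) ↔
      (∀ i : Int, 2 ≤ i → i < num → ¬ (i ∣ num)) := by
  constructor
  · intro h i hi hlt hdvd
    rcases hdvd with ⟨j, hj⟩
    have hjpos : 1 ≤ j := by nlinarith
    have hj2 : 2 ≤ j := by
      by_contra hc
      have hj1 : j = 1 := by omega
      rw [hj1, mul_one] at hj
      omega
    rcases le_total i j with hij | hij
    · have hm : (i.toNat : Int) = i := Int.toNat_of_nonneg (by omega)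
      exact h i.toNat (by omega) (by rw [hm]; nlinarith) (by rw [hm]; exact ⟨j, hj⟩)
    · have hm : (j.toNat : Int) = j := Int.toNat_of_nonneg (by omega)
      exact h j.toNat (by omega) (by rw [hm]; nlinarith)
        (by rw [hm]; exact ⟨i, by rw [hj]; ring⟩)
  · intro h m hm hsq hdvd
    have hmi : (2:Int) ≤ (m:Int) := by exact_mod_cast hm
    have hlt : (m:Int) < num := by nlinarith
    exact h (m:Int) hmi hlt hdvd

-- for num ≥ 2 the two primality tests agree
theorem tests_agree (num : Int) (h1 : num > 1) :
    pvIsPrime num = pvForElse num (PySem.List.pyRange 2 num 1) := by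
  unfold pvIsPrime
  rw [if_neg (by omega)]
  cases hf : pvForElse num (PySem.List.pyRange 2 num 1) with
  | false =>
    simp only [Bool.eq_false_iff, Ne, pvTrial_iff]
    simp only [Bool.eq_false_iff, Ne, pvForElse_iff] at hf
    intro hall
    exact hf ((divisor_conditions num (by omega)).mp hall)
  | true =>
    rw [pvTrial_iff]
    rw [pvForElse_iff] at hf
    exact (divisor_conditions num (by omega)).mpr hf

-- per item, A's step appends exactly B's contribution for that item
theorem per_item (numberList : List Int) (item : String) :
    (let item1 := PySem.Str.replace (PySem.Str.replace item "," "") "." ""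
     if PySem.Str.strIsdigit item1 then
       match PySem.Int.ofStr? item1 with
       | some num =>
         if num > 1 then
           if pvForElse num (PySem.List.pyRange 2 num 1) then numberList ++ [num]
           else numberList
         else numberList
       | none => numberList
     else numberList)
    = numberList ++ ((fun o =>
        match o with
        | some n => if pvIsPrime n then some n else none
        | none => none) (pvToNum? item)).toList := by
  simp only [pvToNum?]
  split_ifs with hd
  · cases hofs : PySem.Int.ofStr? (PySem.Str.replace (PySem.Str.replace item "," "") "." "") with
    | none => simp
    | some num =>
      dsimp only
      by_cases h1 : num > 1
      · rw [if_pos h1, ← tests_agree num h1]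
        cases hp : pvIsPrime num <;> simp [hp]
      · have hp : pvIsPrime num = false := by
          unfold pvIsPrime; rw [if_pos (by omega)]
        simp [if_neg h1, hp]
  · simp

set_option maxHeartbeats 1000000 in
-- the fold with any accumulator, against B's filter of the mapped list
theorem even_fold (l : List String) (acc : List Int) :
    List.foldl (fun numberList item =>
      let item1 := PySem.Str.replace (PySem.Str.replace item "," "") "." ""
      if PySem.Str.strIsdigit item1 then
        match PySem.Int.ofStr? item1 with
        | some num =>
          if num > 1 then
            if pvForElse num (PySem.List.pyRange 2 num 1) then numberList ++ [num]
            else numberList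
          else numberList
        | none => numberList
      else numberList) acc l
    = acc ++ (l.map pvToNum?).filterMap (fun o =>
        match o with
        | some n => if pvIsPrime n then some n else none
        | none => none) := by
  induction l generalizing acc with
  | nil => simp
  | cons x xs ih =>
    rw [List.foldl_cons, ih]
    have hstep := per_item acc x
    dsimp only at hstep ⊢
    rw [hstep, List.map_cons, List.filterMap_cons]
    cases hv : pvToNum? x with
    | none => simp only [Option.toList, List.append_nil]
    | some v =>
      cases hp : pvIsPrime v with
      | false => simp only [hp, Bool.false_eq_true, if_false, Option.toList, List.append_nil]
      | true => simp only [hp, eq_self_iff_true, if_true, Option.toList, List.append_assoc,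
          List.singleton_append]

-- ===== VERDICT (by name: the statement is the Claim_ definition above) =====
theorem even_list_spec : Claim_equal_even_list := by
  intro myList _
  show even_list myList = even_list_alt myList
  unfold even_list even_list_alt
  rw [even_fold]
  exact List.nil_append _
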